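-- pv_equiv track=rewrite | github.com/aarguello/advent-of-code-2023 | day3/utils.py | get_numbers_positions
-- ===== SOURCE A (Python) =====
-- def get_numbers_positions(engine):
--
--   numbers = []
--
--   rows = len(engine)
--   cols = len(engine[0])
--
--   for i in range(rows):
--     for j in range(cols):
--       value = get_number_at_position(engine, i, j)
--       if value:
--         numbers.append((i, j, value))
--
--   return numbers
--
-- def get_number_at_position(engine, i, j):
--
--   if not engine[i][j].isdigit():
--     return None
--
--   # Make sure first digit is at (i, j)
--   if j > 0 and engine[i][j - 1].isdigit():
--     return None
--
--   value, k = "", 0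
--
--   while is_valid_position(engine, i, j + k) and engine[i][j + k].isdigit():
--     value += engine[i][j + k]
--     k += 1
--
--   return value
--
-- def is_valid_position(engine, i, j):
--   return (
--     0 <= i < len(engine) and
--     0 <= j < len(engine[0])
--   )
-- ===== SOURCE B (Python) =====
-- def get_numbers_positions(engine):
--
--   numbers = []
--   cols = len(engine[0])
--
--   for i in range(len(engine)):
--     row = engine[i]
--     acc = ""
--     start = 0
--     for j in range(cols):
--       ch = row[j]
--       if ch.isdigit():
--         if not acc:
--           start = j
--         acc += ch
--       else:
--         if acc:
--           numbers.append((i, start, acc))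
--           acc = ""
--     if acc:
--       numbers.append((i, start, acc))
--
--   return numbers
-- ===== Notes on version B (the rewrite author's own statement) =====
-- stated objective: simpler
-- what changed: Drops the per-cell helper probe (run-start test plus a forward rescan of each digit run) in favour of a single stateful left-to-right sweep per row that accumulates the current digit run and flushes it at each non-digit or at row end.
import Mathlib
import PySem

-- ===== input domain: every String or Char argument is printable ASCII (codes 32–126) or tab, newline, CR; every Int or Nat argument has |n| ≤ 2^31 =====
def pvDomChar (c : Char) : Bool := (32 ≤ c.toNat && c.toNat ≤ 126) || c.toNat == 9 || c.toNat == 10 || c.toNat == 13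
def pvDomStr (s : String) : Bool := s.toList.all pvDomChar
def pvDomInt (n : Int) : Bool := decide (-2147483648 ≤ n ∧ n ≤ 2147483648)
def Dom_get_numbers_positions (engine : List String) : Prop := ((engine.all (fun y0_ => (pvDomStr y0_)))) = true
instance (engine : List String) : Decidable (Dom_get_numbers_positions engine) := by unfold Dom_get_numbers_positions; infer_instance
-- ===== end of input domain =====

-- B replaces A's per-cell probe (run-start test plus a forward rescan of each digit run) by a
-- single stateful left-to-right sweep per row that flushes the accumulated run at each non-digit.

-- ===== PORT A =====
-- engine[0] length (len(engine[0]); the default "" is only reached outside Pre_)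
def pvCols (engine : List String) : Int :=
  ((PySem.List.pyGetD engine 0 "").toList.length : Int)

-- engine[i][j] as a Char (defaults only reached outside Pre_ / dead short-circuit branches)
def pvCharAt (engine : List String) (i j : Int) : Char :=
  PySem.List.pyGetD (PySem.List.pyGetD engine i "").toList j ' '

def is_valid_position (engine : List String) (i j : Int) : Bool :=
  decide (0 ≤ i ∧ i < (engine.length : Int)) && decide (0 ≤ j ∧ j < pvCols engine)

-- the while loop of get_number_at_position; fuel (pvCols engine).toNat + 1 is enough because
-- is_valid_position bounds j + k < pvCols engine and k grows by 1 each iteration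
def pvScanA (engine : List String) (i j : Int) : Nat → List Char → Int → List Char
  | 0, value, _ => value
  | fuel + 1, value, k =>
    if is_valid_position engine i (j + k) && PySem.Chars.isdigit (pvCharAt engine i (j + k)) then
      pvScanA engine i j fuel (value ++ [pvCharAt engine i (j + k)]) (k + 1)
    else value

def get_number_at_position (engine : List String) (i j : Int) : Option (List Char) :=
  if ¬ PySem.Chars.isdigit (pvCharAt engine i j) then none
  else if decide (0 < j) && PySem.Chars.isdigit (pvCharAt engine i (j - 1)) then none
  else some (pvScanA engine i j ((pvCols engine).toNat + 1) [] 0)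

def get_numbers_positions (engine : List String) : List (Int × Int × String) :=
  let rows : Int := engine.length
  let cols : Int := pvCols engine
  (PySem.List.pyRange 0 rows 1).foldl (fun nums i =>
    (PySem.List.pyRange 0 cols 1).foldl (fun nums j =>
      match get_number_at_position engine i j with
      | none => nums
      | some v => if v ≠ [] then nums ++ [(i, j, String.ofList v)] else nums) nums) []

-- ===== PORT B =====
-- one step of B's inner sweep: state = (numbers, acc, start)
def pvRowStep (i : Int) (row : List Char)
    (s : List (Int × Int × String) × List Char × Int) (j : Int) :
    List (Int × Int × String) × List Char × Int :=
  let ch := PySem.List.pyGetD row j ' '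
  if PySem.Chars.isdigit ch then
    (s.1, s.2.1 ++ [ch], if s.2.1 = [] then j else s.2.2)
  else if s.2.1 ≠ [] then (s.1 ++ [(i, s.2.2, String.ofList s.2.1)], [], s.2.2)
  else s

def get_numbers_positions_alt (engine : List String) : List (Int × Int × String) :=
  let cols : Int := ((PySem.List.pyGetD engine 0 "").toList.length : Int)
  (PySem.List.pyRange 0 (engine.length : Int) 1).foldl (fun nums i =>
    let row := (PySem.List.pyGetD engine i "").toList
    let st := (PySem.List.pyRange 0 cols 1).foldl (pvRowStep i row) (nums, [], 0)
    if st.2.1 ≠ [] then st.1 ++ [(i, st.2.2, String.ofList st.2.1)] else st.1) []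

-- ===== PRECONDITION & SPEC =====
-- Pre_ excludes exactly the inputs on which the Python A raises IndexError:
-- the empty grid (len(engine[0])) and grids with a row shorter than row 0 (engine[i][j], j < cols).
def Pre_get_numbers_positions (engine : List String) : Prop :=
  engine ≠ [] ∧ ∀ s ∈ engine, (PySem.List.pyGetD engine 0 "").toList.length ≤ s.toList.length
instance (engine : List String) : Decidable (Pre_get_numbers_positions engine) := by
  unfold Pre_get_numbers_positions; infer_instance

def pvWitness_get_numbers_positions : List String := ["12*", ".305"]

def Spec_get_numbers_positions (engine : List String) (out : List (Int × Int × String)) : Prop := out = get_numbers_positions_alt engine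
instance (engine : List String) (out : List (Int × Int × String)) : Decidable (Spec_get_numbers_positions engine out) := by unfold Spec_get_numbers_positions; infer_instance

-- ===== CLAIM (what is proved, stated in full; the proofs are below) =====
def Claim_equal_get_numbers_positions : Prop := ∀ (engine : List String), Dom_get_numbers_positions engine → Pre_get_numbers_positions engine → Spec_get_numbers_positions engine (get_numbers_positions engine)

-- ===== LEMMAS AND PROOFS =====

-- the character of row i at (nonnegative) column m
def pvC (engine : List String) (i : Int) (m : Nat) : Char := pvCharAt engine i (m : Int)

-- the digit run starting at column m, cut off at column n
def pvFut (engine : List String) (i : Int) (n m : Nat) : List Char :=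
  ((List.range' m (n - m)).map (pvC engine i)).takeWhile PySem.Chars.isdigit

-- the pending triple B still owes relative to A after processing columns < m
def pvPend (engine : List String) (i : Int) (n m : Nat) (acc : List Char) (start : Int) :
    List (Int × Int × String) :=
  if acc = [] then [] else [(i, start, String.ofList (acc ++ pvFut engine i n m))]

-- B's end-of-row flush
def pvFinish (i : Int) (st : List (Int × Int × String) × List Char × Int) :
    List (Int × Int × String) :=
  if st.2.1 ≠ [] then st.1 ++ [(i, st.2.2, String.ofList st.2.1)] else st.1

theorem pvFut_ge (engine : List String) (i : Int) (n m : Nat) (h : n ≤ m) :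
    pvFut engine i n m = [] := by
  simp [pvFut, Nat.sub_eq_zero_of_le h]

theorem pvFut_lt (engine : List String) (i : Int) (n m : Nat) (h : m < n) :
    pvFut engine i n m =
      if PySem.Chars.isdigit (pvC engine i m) then
        pvC engine i m :: pvFut engine i n (m + 1)
      else [] := by
  have h1 : n - m = (n - (m + 1)) + 1 := by omega
  rw [pvFut, h1, List.range'_succ]
  simp [List.takeWhile, pvFut]
  split <;> simp_all

theorem pvScanA_eq (engine : List String) (i : Int)
    (hi : 0 ≤ i) (hi2 : i < (engine.length : Int)) :
    ∀ (fuel : Nat) (j k : Int) (value : List Char), 0 ≤ j + k →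
      (pvCols engine).toNat ≤ (j + k).toNat + fuel →
      pvScanA engine i j fuel value k =
        value ++ pvFut engine i (pvCols engine).toNat (j + k).toNat := by
  have hc0 : 0 ≤ pvCols engine := by simp [pvCols]
  intro fuel
  induction fuel with
  | zero =>
    intro j k value h0 hf
    rw [pvFut_ge _ _ _ _ (by omega), pvScanA]
    simp
  | succ fuel ih =>
    intro j k value h0 hf
    have hpc : ((j + k).toNat : Int) = j + k := Int.toNat_of_nonneg h0
    by_cases hp : (j + k).toNat < (pvCols engine).toNat
    · have hjk : j + k < pvCols engine := by omega
      have hvalid : is_valid_position engine i (j + k) = true := by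
        simp [is_valid_position]
        exact ⟨⟨hi, hi2⟩, h0, hjk⟩
      have hcc : pvC engine i (j + k).toNat = pvCharAt engine i (j + k) := by
        rw [pvC, hpc]
      by_cases hd : PySem.Chars.isdigit (pvCharAt engine i (j + k)) = true
      · rw [pvScanA]
        rw [if_pos (by simp [hvalid, hd])]
        have hsucc : (j + (k + 1)).toNat = (j + k).toNat + 1 := by omega
        rw [ih j (k + 1) _ (by omega) (by omega)]
        rw [hsucc, pvFut_lt _ _ _ _ hp, hcc, if_pos hd]
        simp
      · rw [pvScanA]
        rw [if_neg (by simp [hd])]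
        rw [pvFut_lt _ _ _ _ hp, hcc, if_neg hd]
        simp
    · have hvalid : is_valid_position engine i (j + k) = false := by
        simp [is_valid_position]
        intro _ _
        omega
      rw [pvScanA]
      rw [if_neg (by simp [hvalid])]
      rw [pvFut_ge _ _ _ _ (by omega)]
      simp

theorem pvRow_eq (engine : List String) (i : Int)
    (hi : 0 ≤ i) (hi2 : i < (engine.length : Int)) :
    ∀ (t m : Nat), m + t = (pvCols engine).toNat →
    ∀ (nums : List (Int × Int × String)) (acc : List Char) (start : Int),
      ((acc ≠ []) ↔ (0 < m ∧ PySem.Chars.isdigit (pvC engine i (m - 1)) = true)) →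
      (PySem.List.pyRange (m : Int) ((pvCols engine).toNat : Int) 1).foldl
        (fun nums j =>
          match get_number_at_position engine i j with
          | none => nums
          | some v => if v ≠ [] then nums ++ [(i, j, String.ofList v)] else nums)
        (nums ++ pvPend engine i (pvCols engine).toNat m acc start) =
      pvFinish i
        ((PySem.List.pyRange (m : Int) ((pvCols engine).toNat : Int) 1).foldl
          (pvRowStep i (PySem.List.pyGetD engine i "").toList) (nums, acc, start)) := by
  intro t
  induction t with
  | zero =>
    intro m hm nums acc start hinv
    rw [PySem.List.pyRange_one_eq_nil (by omega)]
    simp only [List.foldl_nil]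
    rw [pvPend, pvFut_ge _ _ _ _ (by omega), pvFinish]
    by_cases hacc : acc = [] <;> simp [hacc]
  | succ t ih =>
    intro m hm nums acc start hinv
    have hmn : m < (pvCols engine).toNat := by omega
    rw [PySem.List.pyRange_one_cons (by exact_mod_cast hmn)]
    simp only [List.foldl_cons]
    have hrow : PySem.List.pyGetD (PySem.List.pyGetD engine i "").toList (m : Int) ' '
        = pvC engine i m := rfl
    have hchar : pvCharAt engine i (m : Int) = pvC engine i m := rfl
    have hcast : ((m + 1 : Nat) : Int) = (m : Int) + 1 := by push_cast; ring
    by_cases hd : PySem.Chars.isdigit (pvC engine i m) = true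
    · -- column m is a digit
      by_cases hacc : acc = []
      · -- start of a new run: A appends the whole run, B opens the accumulator
        subst hacc
        have hguard : (decide (0 < (m : Int)) &&
            PySem.Chars.isdigit (pvCharAt engine i ((m : Int) - 1))) = false := by
          rcases Nat.eq_zero_or_pos m with h0 | h0
          · subst h0; simp
          · have hnd : ¬ PySem.Chars.isdigit (pvC engine i (m - 1)) = true := by
              intro h
              exact absurd (hinv.mpr ⟨h0, h⟩) (by simp)
            have hm1 : ((m : Int) - 1) = ((m - 1 : Nat) : Int) := by omega
            rw [hm1]
            simp only [pvC] at hnd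
            simp [hnd]
        have hscan : pvScanA engine i (m : Int) ((pvCols engine).toNat + 1) [] 0 =
            pvC engine i m :: pvFut engine i (pvCols engine).toNat (m + 1) := by
          have h1 := pvScanA_eq engine i hi hi2 ((pvCols engine).toNat + 1) (m : Int) 0 []
            (by omega) (by omega)
          have h2 : ((m : Int) + 0).toNat = m := by omega
          rw [h1, h2, pvFut_lt _ _ _ _ hmn, if_pos hd]
          simp
        have hnum : get_number_at_position engine i (m : Int) =
            some (pvC engine i m :: pvFut engine i (pvCols engine).toNat (m + 1)) := by
          rw [get_number_at_position, if_neg (by rw [hchar]; simp [hd]),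
              if_neg (by rw [hguard]; simp), hscan]
        have hB : pvRowStep i (PySem.List.pyGetD engine i "").toList (nums, [], start)
            (m : Int) = (nums, [pvC engine i m], (m : Int)) := by
          simp [pvRowStep, hrow, hd]
        rw [hB]
        have hIH := ih (m + 1) (by omega) nums [pvC engine i m] (m : Int) (by simp [hd])
        rw [hcast] at hIH
        rw [← hIH]
        congr 1
        rw [hnum]
        simp [pvPend]
      · -- inside a run: A skips, B extends the accumulator
        have hm0 : 0 < m := (hinv.mp hacc).1
        have hd1 : PySem.Chars.isdigit (pvC engine i (m - 1)) = true := (hinv.mp hacc).2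
        have hnum : get_number_at_position engine i (m : Int) = none := by
          rw [get_number_at_position, if_neg (by rw [hchar]; simp [hd])]
          have hm1 : ((m : Int) - 1) = ((m - 1 : Nat) : Int) := by omega
          rw [if_pos]
          rw [hm1]
          simp only [pvC] at hd1
          simp [hd1]
          omega
        have hB : pvRowStep i (PySem.List.pyGetD engine i "").toList (nums, acc, start)
            (m : Int) = (nums, acc ++ [pvC engine i m], start) := by
          simp [pvRowStep, hrow, hd, hacc]
        rw [hB]
        have hIH := ih (m + 1) (by omega) nums (acc ++ [pvC engine i m]) start
          (by simp [hd])
        rw [hcast] at hIH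
        rw [← hIH]
        congr 1
        rw [hnum]
        simp only [pvPend, hacc, reduceIte, ne_eq, List.append_ne_nil_of_right_ne_nil,
          List.cons_ne_nil, not_false_eq_true]
        rw [pvFut_lt _ _ _ _ hmn, if_pos hd]
        simp
    · -- column m is not a digit: A skips, B flushes the accumulator
      have hnum : get_number_at_position engine i (m : Int) = none := by
        rw [get_number_at_position, if_pos (by rw [hchar]; simp [hd])]
      have hfut : pvFut engine i (pvCols engine).toNat m = [] := by
        rw [pvFut_lt _ _ _ _ hmn, if_neg hd]
      by_cases hacc : acc = []
      · subst hacc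
        have hB : pvRowStep i (PySem.List.pyGetD engine i "").toList (nums, [], start)
            (m : Int) = (nums, [], start) := by
          simp [pvRowStep, hrow, hd]
        rw [hB]
        have hIH := ih (m + 1) (by omega) nums [] start (by simp [hd])
        rw [hcast] at hIH
        rw [← hIH]
        congr 1
        rw [hnum]
        simp [pvPend]
      · have hB : pvRowStep i (PySem.List.pyGetD engine i "").toList (nums, acc, start)
            (m : Int) = (nums ++ [(i, start, String.ofList acc)], [], start) := by
          simp [pvRowStep, hrow, hd, hacc]
        rw [hB]
        have hIH := ih (m + 1) (by omega) (nums ++ [(i, start, String.ofList acc)]) [] start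
          (by simp [hd])
        rw [hcast] at hIH
        rw [← hIH]
        congr 1
        rw [hnum]
        simp [pvPend, hacc, hfut]

-- ===== VERDICT (by name: the statement is the Claim_ definition above) =====
theorem get_numbers_positions_spec : Claim_equal_get_numbers_positions := by
  intro engine _ _
  unfold Spec_get_numbers_positions get_numbers_positions get_numbers_positions_alt
  apply PySem.List.foldl_congr_mem
  intro nums i hmem
  obtain ⟨h1, h2⟩ := PySem.List.mem_pyRange_one.mp hmem
  have hc : ((pvCols engine).toNat : Int) = pvCols engine :=
    Int.toNat_of_nonneg (by simp [pvCols])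
  have h := pvRow_eq engine i h1 h2 (pvCols engine).toNat 0 (by omega) nums [] 0 (by simp)
  rw [Nat.cast_zero, hc] at h
  simpa [pvPend, pvFinish, pvCols] using h
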